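-- pv_equiv track=rewrite | github.com/screnary/Algorithm_python | str_28_strStr.py | strStr_twoPointers
-- ===== SOURCE A (Python) =====
-- def strStr_twoPointers(haystack: str, needle: str) -> int:
--     if not needle: return 0
--     i = 0
--     for i in range(len(haystack)):
--         for j in range(len(needle)):
--             if i+j == len(haystack):
--                 return -1
--             elif needle[j]!=haystack[i+j]:
--                 break
--             elif j == len(needle)-1:
--                 return i
--     return -1
-- ===== SOURCE B (Python) =====
-- def strStr_twoPointers(haystack: str, needle: str) -> int:
--     return haystack.find(needle)
-- ===== Notes on version B (the rewrite author's own statement) =====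
-- stated objective: idiomatic
-- what changed: Replaced the hand-written nested-loop character scan with the standard-library str.find, which returns the same first-occurrence index (0 for an empty needle, -1 if absent).
import Mathlib
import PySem

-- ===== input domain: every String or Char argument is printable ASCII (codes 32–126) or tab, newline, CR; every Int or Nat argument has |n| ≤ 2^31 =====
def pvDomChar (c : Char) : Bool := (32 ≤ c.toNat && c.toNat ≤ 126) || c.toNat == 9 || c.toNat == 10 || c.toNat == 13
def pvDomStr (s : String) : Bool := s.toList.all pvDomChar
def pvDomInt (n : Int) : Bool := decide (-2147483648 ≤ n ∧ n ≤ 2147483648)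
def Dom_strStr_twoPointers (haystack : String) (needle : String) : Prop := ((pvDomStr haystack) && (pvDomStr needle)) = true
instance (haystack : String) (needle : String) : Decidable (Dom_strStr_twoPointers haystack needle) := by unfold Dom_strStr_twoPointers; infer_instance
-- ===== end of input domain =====

-- B replaces A's hand-written nested-loop scan with the idiomatic str.find; equal first-occurrence index is proved below.

-- ===== PORT A =====
-- inner 'for j in range(len(needle))' loop: some r = an early 'return r', none = 'break' / loop end
def pvInnerA (h n : List Char) (i : Nat) : List Nat → Option Int
  | [] => none
  | j :: js =>
    if i + j = h.length then some (-1)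
    else if n[j]? ≠ h[i + j]? then none
    else if j = n.length - 1 then some (i : Int)
    else pvInnerA h n i js

-- outer 'for i in range(len(haystack))' loop
def pvOuterA (h n : List Char) : List Nat → Int
  | [] => -1
  | i :: is =>
    match pvInnerA h n i (List.range n.length) with
    | some r => r
    | none => pvOuterA h n is

def strStr_twoPointers (haystack : String) (needle : String) : Int :=
  if needle.toList.length = 0 then 0
  else pvOuterA haystack.toList needle.toList (List.range haystack.toList.length)

-- ===== PORT B =====
def strStr_twoPointers_alt (haystack : String) (needle : String) : Int :=
  PySem.Str.find haystack needle

-- ===== PRECONDITION & SPEC =====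
def Spec_strStr_twoPointers (haystack : String) (needle : String) (out : Int) : Prop := out = strStr_twoPointers_alt haystack needle
instance (haystack : String) (needle : String) (out : Int) : Decidable (Spec_strStr_twoPointers haystack needle out) := by unfold Spec_strStr_twoPointers; infer_instance

-- ===== CLAIM (what is proved, stated in full; the proofs are below) =====
def Claim_equal_strStr_twoPointers : Prop := ∀ (haystack : String) (needle : String), Dom_strStr_twoPointers haystack needle → Spec_strStr_twoPointers haystack needle (strStr_twoPointers haystack needle)

-- ===== LEMMAS AND PROOFS =====

-- the inner loop, entered at index j with i+j still inside the haystack, decides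
-- prefix / ran-out-of-haystack / mismatch for the remaining characters
theorem pvInnerA_spec (h n : List Char) (i : Nat) :
    ∀ k j, j < n.length → k = n.length - j → i + j ≤ h.length →
    pvInnerA h n i (List.range' j k) =
      (if n.drop j <+: h.drop (i + j) then some (i : Int)
       else if h.drop (i + j) <+: n.drop j then some (-1)
       else none) := by
  intro k
  induction k with
  | zero => intro j hj hk _; omega
  | succ m ih =>
    intro j hj hk hij
    rw [List.range'_succ]
    by_cases hL : i + j = h.length
    · have hnd : n.drop j ≠ [] := by
        intro e
        have := List.drop_eq_nil_iff.mp e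
        omega
      simp [pvInnerA, hL, hnd]
    · have hlt : i + j < h.length := by omega
      have hgh : h[i+j]? = some h[i+j] := List.getElem?_eq_getElem hlt
      have hgn : n[j]? = some n[j] := List.getElem?_eq_getElem hj
      have hnd : n.drop j = n[j] :: n.drop (j+1) := List.drop_eq_getElem_cons hj
      have hhd : h.drop (i+j) = h[i+j] :: h.drop (i+j+1) := List.drop_eq_getElem_cons hlt
      by_cases hne : n[j]? = h[i+j]?
      · have hch : n[j] = h[i+j] := by
          rw [hgn, hgh] at hne; exact Option.some.inj hne
        by_cases hlast : j = n.length - 1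
        · have hnd1 : n.drop (j+1) = [] := by
            apply List.drop_eq_nil_of_le; omega
          simp only [pvInnerA]
          rw [if_neg hL, if_neg (by simp [hne]), if_pos hlast, hnd, hhd, hnd1,
            if_pos (List.cons_prefix_cons.mpr ⟨hch, List.nil_prefix⟩)]
        · have hrec := ih (j+1) (by omega) (by omega) (by omega)
          have e1 : i + (j + 1) = i + j + 1 := by omega
          rw [e1] at hrec
          simp only [pvInnerA]
          rw [if_neg hL, if_neg (by simp [hne]), if_neg hlast, hrec, hnd]
          have hP : (n[j] :: List.drop (j+1) n <+: List.drop (i+j) h) ↔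
              (List.drop (j+1) n <+: List.drop (i+j+1) h) := by
            rw [hhd, List.cons_prefix_cons]
            exact and_iff_right hch
          have hQ : (List.drop (i+j) h <+: n[j] :: List.drop (j+1) n) ↔
              (List.drop (i+j+1) h <+: List.drop (j+1) n) := by
            rw [hhd, List.cons_prefix_cons]
            exact and_iff_right hch.symm
          simp only [hP, hQ]
      · have hch : n[j] ≠ h[i+j] := by
          rw [hgn, hgh] at hne
          intro e; exact hne (by rw [e])
        simp only [pvInnerA]
        rw [if_neg hL, if_pos hne, hnd, hhd]
        rw [if_neg (by rw [List.cons_prefix_cons]; rintro ⟨e, -⟩; exact hch e),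
            if_neg (by rw [List.cons_prefix_cons]; rintro ⟨e, -⟩; exact hch e.symm)]

theorem pvOuterA_none (h n : List Char) :
    ∀ k i, i + k = h.length →
    (∀ i', i ≤ i' → i' < h.length →
      pvInnerA h n i' (List.range n.length) = none ∨
      pvInnerA h n i' (List.range n.length) = some (-1)) →
    pvOuterA h n (List.range' i k) = -1 := by
  intro k
  induction k with
  | zero => intro i _ _; simp [pvOuterA]
  | succ m ih =>
    intro i hik hall
    rw [List.range'_succ]
    have hi : i < h.length := by omega
    rcases hall i le_rfl hi with hc | hc <;> simp [pvOuterA, hc]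
    exact ih (i + 1) (by omega) (fun i' h1 h2 => hall i' (by omega) h2)

theorem pvOuterA_found (h n : List Char) :
    ∀ k i t v, i + k = h.length → i ≤ t → t < h.length →
    (∀ i', i ≤ i' → i' < t → pvInnerA h n i' (List.range n.length) = none) →
    pvInnerA h n t (List.range n.length) = some v →
    pvOuterA h n (List.range' i k) = v := by
  intro k
  induction k with
  | zero => intro i t v hik hit ht _ _; omega
  | succ m ih =>
    intro i t v hik hit ht hnone hfound
    rw [List.range'_succ]
    by_cases he : i = t
    · subst he; simp [pvOuterA, hfound]
    · have : pvInnerA h n i (List.range n.length) = none :=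
        hnone i le_rfl (by omega)
      simp [pvOuterA, this]
      exact ih (i + 1) t v (by omega) (by omega) ht
        (fun i' h1 h2 => hnone i' (by omega) h2) hfound

theorem pvMain (h n : List Char) (hn : n ≠ []) :
    pvOuterA h n (List.range h.length) = PySem.Chars.find h n := by
  have hnl : 0 < n.length := List.length_pos_of_ne_nil hn
  have inner_zero : ∀ i, i < h.length →
      pvInnerA h n i (List.range n.length) =
        (if n <+: h.drop i then some (i : Int)
         else if h.drop i <+: n then some (-1) else none) := by
    intro i hi
    have := pvInnerA_spec h n i n.length 0 hnl (by omega) (by omega)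
    simpa [List.range_eq_range'] using this
  by_cases hocc : n <:+: h
  · have hfind0 : 0 ≤ PySem.Chars.find h n := (PySem.Chars.find_nonneg_iff h n).mpr hocc
    obtain ⟨hpre, hmin⟩ := PySem.Chars.find_spec hfind0
    have hlen : n.length ≤ h.length - (PySem.Chars.find h n).toNat := by
      have := hpre.length_le
      simpa using this
    have ht : (PySem.Chars.find h n).toNat < h.length := by omega
    rw [List.range_eq_range']
    rw [pvOuterA_found h n h.length 0 (PySem.Chars.find h n).toNat
      ((PySem.Chars.find h n).toNat : Int) (by omega) (by omega) ht
      (by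
        intro i' _ hi'
        rw [inner_zero i' (by omega)]
        rw [if_neg (hmin i' hi')]
        rw [if_neg (by
          intro hq
          have h1 := hq.length_le
          simp only [List.length_drop] at h1
          omega)]
      )
      (by rw [inner_zero _ ht, if_pos hpre])]
    exact congrArg Int.ofNat (by omega) |>.trans (Int.toNat_of_nonneg hfind0)
  · have hfind : PySem.Chars.find h n = -1 := (PySem.Chars.find_eq_neg_one_iff h n).mpr hocc
    rw [hfind, List.range_eq_range']
    apply pvOuterA_none h n h.length 0 (by omega)
    intro i' _ hi'
    rw [inner_zero i' hi']
    have hnp : ¬ n <+: h.drop i' := fun hp =>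
      hocc (hp.isInfix.trans (List.drop_suffix i' h).isInfix)
    rw [if_neg hnp]
    by_cases hq : h.drop i' <+: n
    · right; rw [if_pos hq]
    · left; rw [if_neg hq]

-- ===== VERDICT (by name: the statement is the Claim_ definition above) =====
theorem strStr_twoPointers_spec : Claim_equal_strStr_twoPointers := by
  intro haystack needle _
  unfold Spec_strStr_twoPointers strStr_twoPointers strStr_twoPointers_alt
  by_cases hn : needle.toList.length = 0
  · simp [List.length_eq_zero_iff.mp hn, PySem.Chars.find_nil]
  · simp only [hn, if_false]
    rw [pvMain _ _ (by intro e; exact hn (by simp [e]))]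
    simp
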